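-- pv_equiv track=rewrite | github.com/moottier/image_resizer | resizer.py | validate_size
-- ===== SOURCE A (Python) =====
-- def validate_size(size: str) -> bool:
--     is_valid = True
--     size = size.lower()
--     if len(size) < 3:
--         is_valid = False
--     elif len(size) > 20:    # arbitrary maximum
--         is_valid = False
--     elif 'x' not in size.lower():
--         is_valid = False
--     elif size[0] == 'x' or size[-1] == 'x':
--         is_valid = False
--     elif not all([char in '0123456789' for char in size.replace('x','')]):
--         is_valid = False
--     return is_valid
-- ===== SOURCE B (Python) =====
-- def _dfa_step(state, c):
--     # DFA for the pattern digit (digit|x)* digit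
--     if c in '0123456789':
--         return 1 if state == 0 else (2 if state in (1, 2, 3) else 4)
--     if c == 'x':
--         return 3 if state in (1, 2, 3) else 4
--     return 4
--
--
-- def validate_size(size: str) -> bool:
--     s = size.lower()
--     if not (3 <= len(s) <= 20 and 'x' in s):
--         return False
--     state = 0
--     for c in s:
--         state = _dfa_step(state, c)
--     return state == 2
-- ===== Notes on version B (the rewrite author's own statement) =====
-- stated objective: alternative
-- what changed: Replaces A's chain of positional checks (first/last-character tests plus a strip-separators-then-all-digits pass) by a single left-to-right DFA pass recognising digit(digit|separator)*digit, keeping the length and separator-present guards.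
import Mathlib
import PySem

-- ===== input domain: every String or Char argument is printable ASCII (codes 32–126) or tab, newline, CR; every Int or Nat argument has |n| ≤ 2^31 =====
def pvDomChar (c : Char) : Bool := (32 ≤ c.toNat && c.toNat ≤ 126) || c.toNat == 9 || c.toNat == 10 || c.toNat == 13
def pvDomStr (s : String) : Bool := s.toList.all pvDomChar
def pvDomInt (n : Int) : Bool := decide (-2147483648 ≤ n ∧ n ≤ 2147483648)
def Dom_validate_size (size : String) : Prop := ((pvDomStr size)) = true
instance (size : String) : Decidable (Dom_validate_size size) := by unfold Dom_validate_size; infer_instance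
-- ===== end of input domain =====

-- B replaces A's chain of positional checks and the strip-then-all-digits scan by a
-- single left-to-right DFA pass for digit(digit|separator)*digit (objective: alternative).

-- ===== PORT A =====
def validate_size (size : String) : Bool :=
  let is_valid := true
  let size := PySem.Str.lower size
  if PySem.Str.len size < 3 then false
  else if PySem.Str.len size > 20 then false
  else if !(PySem.Str.isIn "x" (PySem.Str.lower size)) then false
  else if (PySem.Str.pyGet? size 0 == some 'x') || (PySem.Str.pyGet? size (-1) == some 'x') then false
  else if !((PySem.Str.replace size "x" "").toList.all
              (fun ch => PySem.Chars.isIn [ch] "0123456789".toList)) then false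
  else is_valid

-- ===== PORT B =====
def dfaStep (st : Nat) (c : Char) : Nat :=
  if PySem.Chars.isIn [c] "0123456789".toList then
    if st == 0 then 1 else if st == 1 || st == 2 || st == 3 then 2 else 4
  else if c == 'x' then
    if st == 1 || st == 2 || st == 3 then 3 else 4
  else 4

def validate_size_alt (size : String) : Bool :=
  let s := PySem.Str.lower size
  if !(decide (3 ≤ PySem.Str.len s) && decide (PySem.Str.len s ≤ 20) && PySem.Str.isIn "x" s) then
    false
  else
    (s.toList.foldl dfaStep 0) == 2

-- ===== PRECONDITION & SPEC =====
def Spec_validate_size (size : String) (out : Bool) : Prop := out = validate_size_alt size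
instance (size : String) (out : Bool) : Decidable (Spec_validate_size size out) := by unfold Spec_validate_size; infer_instance

-- ===== CLAIM (what is proved, stated in full; the proofs are below) =====
def Claim_equal_validate_size : Prop := ∀ (size : String), Dom_validate_size size → Spec_validate_size size (validate_size size)

-- ===== LEMMAS AND PROOFS =====

theorem lc_idem (c : Char) :
    PySem.Chars.lowerChar (PySem.Chars.lowerChar c) = PySem.Chars.lowerChar c := by
  simp only [PySem.Chars.lowerChar, PySem.Chars.isupper]
  by_cases h1 : 'A' ≤ c ∧ c ≤ 'Z'
  · have hu : (65:Nat) ≤ c.toNat := h1.1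
    have hz : c.toNat ≤ 90 := h1.2
    have hv : (c.toNat + 32).isValidChar := Or.inl (by omega)
    have hb : (Char.ofNat (c.toNat + 32)).toNat = c.toNat + 32 := by
      rw [Char.toNat_ofNat, if_pos hv]
    simp only [h1.1, h1.2, decide_true, Bool.and_self, if_true]
    have hnz : ¬ (Char.ofNat (c.toNat + 32) ≤ 'Z') := by
      intro h
      have : (Char.ofNat (c.toNat + 32)).toNat ≤ 90 := h
      omega
    simp [hnz]
  · rcases not_and_or.mp h1 with h | h <;> simp [h]

theorem lower_idem (l : List Char) :
    PySem.Chars.lower (PySem.Chars.lower l) = PySem.Chars.lower l := by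
  simp [PySem.Chars.lower, Function.comp, lc_idem]

theorem replace_go_x : ∀ (fuel : Nat) (l acc : List Char), l.length ≤ fuel →
    PySem.Chars.replace.go ['x'] [] fuel l acc
      = acc.reverse ++ l.filter (fun a => !(a == 'x')) := by
  intro fuel
  induction fuel with
  | zero =>
    intro l acc h
    have : l = [] := List.length_eq_zero_iff.mp (Nat.le_zero.mp h)
    subst this; simp [PySem.Chars.replace.go]
  | succ n ih =>
    intro l acc h
    match l with
    | [] => simp [PySem.Chars.replace.go]
    | c :: t =>
      rw [PySem.Chars.replace.go]
      by_cases hc : c = 'x'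
      · subst hc
        have hp : List.isPrefixOf ['x'] ('x' :: t) = true := by
          simp [List.isPrefixOf]
        simp only [hp, if_true]
        rw [ih _ _ (by simpa using Nat.lt_succ_iff.mp (by simpa using h))]
        simp
      · have hp : List.isPrefixOf ['x'] (c :: t) = false := by
          simp [List.isPrefixOf]; exact fun h' => hc h'.symm
        simp only [hp, Bool.false_eq_true, if_false]
        rw [ih _ _ (by simpa using Nat.lt_succ_iff.mp (by simpa using h))]
        simp [hc]

theorem replace_x (l : List Char) :
    PySem.Chars.replace l ['x'] [] = l.filter (fun a => !(a == 'x')) := by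
  rw [PySem.Chars.replace]
  simp only [List.isEmpty, Bool.false_eq_true, if_false]
  rw [replace_go_x l.length l [] (le_refl _)]
  simp

theorem pyGet_zero (c : Char) (t : List Char) :
    PySem.List.pyGet? (c :: t) (0:Int) = some c := by
  simp [PySem.List.pyGet?, PySem.List.pyIdx?]

theorem pyGet_neg_one (l : List Char) (h : l ≠ []) :
    PySem.List.pyGet? l (-1:Int) = l.getLast? := by
  have hn : 0 < l.length := List.length_pos_iff.mpr h
  simp only [PySem.List.pyGet?, PySem.List.pyIdx?]
  have h1 : ¬ ((0:Int) ≤ -1) := by omega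
  have h2 : (-(l.length:Int)) ≤ -1 := by omega
  simp only [h1, if_false, h2, if_true, Option.bind_some]
  rw [List.getLast?_eq_getElem?]
  norm_num

theorem dfa_dead (l : List Char) : l.foldl dfaStep 4 = 4 := by
  induction l with
  | nil => rfl
  | cons c t ih => simpa [dfaStep] using ih

theorem dfa_run : ∀ (t : List Char) (ht : t ≠ []) (st : Nat),
    (st = 1 ∨ st = 2 ∨ st = 3) →
    ((t.foldl dfaStep st = 2) ↔
      ((∀ a ∈ t, PySem.Chars.isIn [a] ['0','1','2','3','4','5','6','7','8','9'] = true ∨ a = 'x') ∧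
        PySem.Chars.isIn [t.getLast ht] ['0','1','2','3','4','5','6','7','8','9'] = true)) := by
  intro t
  induction t with
  | nil => intro ht; exact absurd rfl ht
  | cons c t ih =>
    intro hne st hst
    by_cases hdig : PySem.Chars.isIn [c] ['0','1','2','3','4','5','6','7','8','9'] = true
    · have hv : dfaStep st c = 2 := by
        rcases hst with h | h | h <;> subst h <;> simp [dfaStep, hdig]
      rw [List.foldl_cons, hv]
      by_cases ht' : t = []
      · subst ht'
        simp [hdig]
      · rw [ih ht' 2 (by simp),
          show (c :: t).getLast hne = t.getLast ht' from List.getLast_cons ht']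
        simp [hdig]
    · by_cases hx : c = 'x'
      · subst hx
        have hv : dfaStep st 'x' = 3 := by
          rcases hst with h | h | h <;> subst h <;> simp [dfaStep, hdig]
        rw [List.foldl_cons, hv]
        by_cases ht' : t = []
        · subst ht'
          simp [hdig]
        · rw [ih ht' 3 (by simp),
            show ('x' :: t).getLast hne = t.getLast ht' from List.getLast_cons ht']
          simp
      · have hv : dfaStep st c = 4 := by
          simp [dfaStep, hdig, hx]
        rw [List.foldl_cons, hv, dfa_dead]
        constructor
        · intro h; omega
        · rintro ⟨h, -⟩
          rcases h c (by simp) with h' | h'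
          · exact absurd h' hdig
          · exact absurd h' hx

-- ===== VERDICT (by name: the statement is the Claim_ definition above) =====
theorem validate_size_spec : Claim_equal_validate_size := by
  intro size _
  unfold Spec_validate_size validate_size validate_size_alt
  simp only [PySem.Str.len, PySem.Str.isIn, PySem.Str.pyGet?, PySem.Str.replace,
    PySem.Str.lower, PySem.Chars.pyGet?_eq_listPyGet?, String.toList_ofList]
  rw [lower_idem]
  generalize PySem.Chars.lower size.toList = l
  simp only [show "x".toList = ['x'] from rfl, show "".toList = [] from rfl,
    show "0123456789".toList = ['0','1','2','3','4','5','6','7','8','9'] from rfl]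
  by_cases h3 : (3:Int) ≤ (l.length : Int)
  · rw [if_neg (by omega)]
    by_cases h20 : (l.length : Int) ≤ 20
    · rw [if_neg (by omega)]
      simp only [h3, h20, decide_true, Bool.true_and]
      cases hx : PySem.Chars.isIn ['x'] l
      · simp
      · simp only [Bool.not_true, Bool.false_eq_true, if_false]
        obtain ⟨c, t, rfl⟩ : ∃ c t, l = c :: t := by
          cases l with
          | nil => simp at h3
          | cons c t => exact ⟨c, t, rfl⟩
        have ht : t ≠ [] := by
          rintro rfl; simp at h3
        rw [pyGet_zero, pyGet_neg_one _ (List.cons_ne_nil c t), replace_x,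
          List.getLast?_eq_some_getLast (List.cons_ne_nil c t), List.getLast_cons ht, List.foldl_cons]
        by_cases hdig : PySem.Chars.isIn [c] ['0','1','2','3','4','5','6','7','8','9'] = true
        · have hcx : c ≠ 'x' := by rintro rfl; revert hdig; decide
          have hv : dfaStep 0 c = 1 := by simp [dfaStep, hdig]
          rw [hv]
          have hrun := dfa_run t ht 1 (by simp)
          by_cases hgl : t.getLast ht = 'x'
          · have hB : (t.foldl dfaStep 1 == 2) = false := by
              rw [beq_eq_false_iff_ne]
              intro h
              rcases hrun.mp h with ⟨-, hd⟩
              rw [hgl] at hd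
              revert hd; decide
            simp [hgl, hB]
          · have hiff : (((c :: t).filter (fun a => !(a == 'x'))).all
                (fun ch => PySem.Chars.isIn [ch] ['0','1','2','3','4','5','6','7','8','9']))
                  = ((t.foldl dfaStep 1) == 2) := by
              rw [Bool.eq_iff_iff, beq_iff_eq, hrun, List.all_eq_true]
              constructor
              · intro h
                refine ⟨fun a ha => ?_, ?_⟩
                · by_cases hax : a = 'x'
                  · exact Or.inr hax
                  · exact Or.inl (h a (List.mem_filter.mpr
                      ⟨List.mem_cons_of_mem c ha, by simp [hax]⟩))
                · exact h _ (List.mem_filter.mpr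
                    ⟨List.mem_cons_of_mem c (List.getLast_mem ht), by simp [hgl]⟩)
              · rintro ⟨h1, h2⟩ a ha
                rcases List.mem_filter.mp ha with ⟨ham, hax⟩
                rcases List.mem_cons.mp ham with rfl | ham'
                · exact hdig
                · rcases h1 a ham' with h | h
                  · exact h
                  · simp [h] at hax
            rw [if_neg (show ¬ ((some c == some 'x' || (some (t.getLast ht) == some 'x')) = true)
              by simp [hcx, hgl]), hiff]
            generalize (t.foldl dfaStep 1 == 2) = b
            cases b <;> rfl
        · rw [Bool.not_eq_true] at hdig
          have hv : dfaStep 0 c = 4 := by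
            by_cases hcx : c = 'x'
            · subst hcx; simp [dfaStep, hdig]
            · simp [dfaStep, hdig, hcx]
          rw [hv, dfa_dead]
          by_cases hcx : c = 'x'
          · subst hcx; simp
          · simp [hcx, hdig]
    · rw [if_pos (show (l.length : Int) > 20 by omega)]
      simp [h20]
  · rw [if_pos (by omega)]
    simp [show ¬ ((3:Int) ≤ (l.length : Int)) from h3]
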